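-- pv_equiv track=rewrite | github.com/pypi-data/pypi-mirror-353 | packages/bobleesj.utils/bobleesj_utils-0.0.3.tar.gz/bobleesj_utils-0.0.3/src/bobleesj/utils/cli/news.py | insert_message_in_section
-- ===== SOURCE A (Python) =====
-- def insert_message_in_section(lines, section, message):
--     new_lines = []
--     inserted = False
--     i = 0
--
--     while i < len(lines):
--         line = lines[i]
--         stripped = line.strip()
--         new_lines.append(line)
--
--         if not inserted and stripped == section:
--             # Clean out placeholder and blank lines
--             j = i + 1
--             while j < len(lines) and lines[j].strip() in ("", "* <news item>"):
--                 j += 1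
--
--             new_lines.append("\n")
--             new_lines.append(f"* {message}\n")
--             if j >= len(lines) or lines[j].strip().startswith("**"):
--                 new_lines.append("\n")
--             inserted = True
--             i = j - 1  # Skip cleared lines
--         i += 1
--
--     return ensure_section_spacing(new_lines)
--
-- def ensure_section_spacing(lines):
--     fixed_lines = []
--     for idx, line in enumerate(lines):
--         fixed_lines.append(line)
--         if line.strip().startswith("**") and idx + 1 < len(lines):
--             if lines[idx + 1].strip() != "":
--                 fixed_lines.append("\n")
--     return fixed_lines
-- ===== SOURCE B (Python) =====
-- def ensure_section_spacing(lines):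
--     out = []
--     for cur, nxt in zip(lines, lines[1:] + [""]):
--         out.append(cur)
--         if cur.strip().startswith("**") and nxt.strip() != "":
--             out.append("\n")
--     return out
--
-- def insert_message_in_section(lines, section, message):
--     idx = next((k for k, l in enumerate(lines) if l.strip() == section), None)
--     if idx is None:
--         return ensure_section_spacing(list(lines))
--     j = idx + 1
--     while j < len(lines) and lines[j].strip() in ("", "* <news item>"):
--         j += 1
--     block = ["\n", f"* {message}\n"]
--     if j >= len(lines) or lines[j].strip().startswith("**"):
--         block.append("\n")
--     return ensure_section_spacing(lines[:idx + 1] + block + lines[j:])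
-- ===== Notes on version B (the rewrite author's own statement) =====
-- stated objective: alternative
-- what changed: Replaces A's single stateful while-loop (inserted flag, index jumping via i = j - 1) with find-first-matching-index plus a list splice lines[:idx+1] + block + lines[j:], and rewrites ensure_section_spacing as a recursive head/rest decomposition instead of an indexed enumerate loop with lookahead.
import Mathlib
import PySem

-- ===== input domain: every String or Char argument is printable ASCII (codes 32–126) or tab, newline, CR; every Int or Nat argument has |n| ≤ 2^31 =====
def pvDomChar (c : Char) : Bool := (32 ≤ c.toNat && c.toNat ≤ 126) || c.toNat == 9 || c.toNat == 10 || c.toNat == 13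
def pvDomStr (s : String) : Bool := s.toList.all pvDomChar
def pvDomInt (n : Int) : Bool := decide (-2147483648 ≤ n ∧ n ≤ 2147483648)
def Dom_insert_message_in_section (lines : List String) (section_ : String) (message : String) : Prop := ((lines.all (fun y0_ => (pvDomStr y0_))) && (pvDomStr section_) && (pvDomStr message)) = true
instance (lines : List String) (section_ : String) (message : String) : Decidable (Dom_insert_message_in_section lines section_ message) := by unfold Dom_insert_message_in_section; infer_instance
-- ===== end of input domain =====

-- B re-decomposes A's single flagged while-loop as find-first-index + splice (and a recursive
-- spacing helper); same return value for every input, similar cost (objective: alternative).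

-- shared helper: both Pythons contain the identical `while j < len(lines) and lines[j].strip() in ("", "* <news item>")` loop
def skipBlank (lines : List String) (j : Nat) : Nat :=
  if h : j < lines.length then
    if PySem.Str.strip lines[j] == "" || PySem.Str.strip lines[j] == "* <news item>" then
      skipBlank lines (j + 1)
    else j
  else j
termination_by lines.length - j
decreasing_by omega

-- needed by aloopA's termination proof
theorem skipBlank_ge_aux (lines : List String) : ∀ (n j : Nat), lines.length - j = n → j ≤ skipBlank lines j := by
  intro n
  induction n with
  | zero =>
    intro j h
    rw [skipBlank]
    split
    · split
      · omega
      · omega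
    · omega
  | succ n ih =>
    intro j h
    rw [skipBlank]
    split
    · split
      · have := ih (j + 1) (by omega); omega
      · omega
    · omega

theorem skipBlank_ge (lines : List String) (j : Nat) : j ≤ skipBlank lines j :=
  skipBlank_ge_aux lines (lines.length - j) j rfl

-- ===== PORT A =====
-- `for idx, line in enumerate(lines)` with the `lines[idx+1]` lookahead (the lookup is guarded by idx+1 < len)
def essA (all : List String) : List String :=
  (PySem.List.enumerate all).foldl (fun acc p =>
    let acc1 := acc ++ [p.2]
    if PySem.Str.startswith (PySem.Str.strip p.2) "**" && decide (p.1 + 1 < (all.length : Int)) then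
      if PySem.Str.strip (PySem.List.pyGetD all (p.1 + 1) "") != "" then acc1 ++ ["\n"] else acc1
    else acc1) []

-- the main `while i < len(lines)` loop of A, state (new_lines, inserted, i)
def aloopA (lines : List String) (section_ message : String) (acc : List String) (inserted : Bool) (i : Nat) : List String :=
  if h : i < lines.length then
    let line := lines[i]
    let stripped := PySem.Str.strip line
    let acc1 := acc ++ [line]
    if !inserted && (stripped == section_) then
      let j := skipBlank lines (i + 1)
      let acc2 := acc1 ++ ["\n", "* " ++ message ++ "\n"] ++
        (if lines.length ≤ j || PySem.Str.startswith (PySem.Str.strip (lines.getD j "")) "**" then ["\n"] else [])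
      aloopA lines section_ message acc2 true j   -- i = j - 1; i += 1  ⇒ next i is j (j ≥ i+1)
    else
      aloopA lines section_ message acc1 inserted (i + 1)
  else acc
termination_by lines.length - i
decreasing_by
  · have := skipBlank_ge lines (i + 1); omega
  · omega

def insert_message_in_section (lines : List String) (section_ : String) (message : String) : List String :=
  essA (aloopA lines section_ message [] false 0)

-- ===== PORT B =====
-- ensure_section_spacing as one pass over the pairwise zip of lines with their successors (sentinel "")
def essB (lines : List String) : List String :=
  (lines.zip (lines.drop 1 ++ [""])).foldl (fun acc p =>
    let acc1 := acc ++ [p.1]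
    if PySem.Str.startswith (PySem.Str.strip p.1) "**" && (PySem.Str.strip p.2 != "") then acc1 ++ ["\n"]
    else acc1) []

def insert_message_in_section_alt (lines : List String) (section_ : String) (message : String) : List String :=
  match lines.findIdx? (fun l => PySem.Str.strip l == section_) with
  | none => essB lines
  | some idx =>
    let j := skipBlank lines (idx + 1)
    let block := ["\n", "* " ++ message ++ "\n"] ++
      (if lines.length ≤ j || PySem.Str.startswith (PySem.Str.strip (lines.getD j "")) "**" then ["\n"] else [])
    essB (lines.take (idx + 1) ++ block ++ lines.drop j)

-- ===== PRECONDITION & SPEC =====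
def Spec_insert_message_in_section (lines : List String) (section_ : String) (message : String) (out : List String) : Prop := out = insert_message_in_section_alt lines section_ message
instance (lines : List String) (section_ : String) (message : String) (out : List String) : Decidable (Spec_insert_message_in_section lines section_ message out) := by unfold Spec_insert_message_in_section; infer_instance

-- ===== CLAIM (what is proved, stated in full; the proofs are below) =====
def Claim_equal_insert_message_in_section : Prop := ∀ (lines : List String) (section_ : String) (message : String), Dom_insert_message_in_section lines section_ message → Spec_insert_message_in_section lines section_ message (insert_message_in_section lines section_ message)

-- ===== LEMMAS AND PROOFS =====
-- recursive reference form of ensure_section_spacing, used only inside the proofs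
def essR : List String → List String
  | [] => []
  | head :: rest =>
    head :: ((if PySem.Str.startswith (PySem.Str.strip head) "**" &&
                 (match rest with | [] => false | n :: _ => PySem.Str.strip n != "") then ["\n"] else []) ++ essR rest)

theorem essB_go : ∀ (l : List String) (acc : List String),
    (l.zip (l.drop 1 ++ [""])).foldl (fun acc p =>
      let acc1 := acc ++ [p.1]
      if PySem.Str.startswith (PySem.Str.strip p.1) "**" && (PySem.Str.strip p.2 != "") then acc1 ++ ["\n"]
      else acc1) acc = acc ++ essR l := by
  intro l
  induction l with
  | nil => intro acc; simp [essR]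
  | cons x t ih =>
    intro acc
    cases t with
    | nil =>
      simp [essR]
      intro _
      decide
    | cons y t' =>
      rw [show ((x :: y :: t').zip ((x :: y :: t').drop 1 ++ [""])) =
            (x, y) :: ((y :: t').zip ((y :: t').drop 1 ++ [""])) from by simp]
      rw [List.foldl_cons, ih]
      simp only [essR]
      by_cases h1 : PySem.Chars.startswith (PySem.Chars.strip x.toList) ['*', '*'] = true
      · by_cases h2 : (PySem.Str.strip y != "") = true
        · simp [h1, h2]
        · simp [h1, h2]
      · by_cases h2 : (PySem.Str.strip y != "") = true
        · simp [h1, h2]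
        · simp [h1, h2]

theorem essB_eq_essR (l : List String) : essB l = essR l := by
  have := essB_go l []
  simpa [essB] using this

theorem essA_go (all : List String) : ∀ (n i : Nat) (acc : List String), all.length - i = n →
    (PySem.List.enumerate (all.drop i) i).foldl (fun acc p =>
      let acc1 := acc ++ [p.2]
      if PySem.Str.startswith (PySem.Str.strip p.2) "**" && decide (p.1 + 1 < (all.length : Int)) then
        if PySem.Str.strip (PySem.List.pyGetD all (p.1 + 1) "") != "" then acc1 ++ ["\n"] else acc1
      else acc1) acc = acc ++ essR (all.drop i) := by
  intro n
  induction n with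
  | zero =>
    intro i acc h
    rw [List.drop_eq_nil_of_le (by omega)]
    simp [essR]
  | succ n ih =>
    intro i acc h
    by_cases hi : i < all.length
    · have hd : all.drop i = all[i] :: all.drop (i + 1) := List.drop_eq_getElem_cons hi
      have hcast : ((i : Int) + 1) = ((i + 1 : Nat) : Int) := by push_cast; ring
      rw [hd, PySem.List.enumerate_cons, List.foldl_cons]
      rw [show ((i : Int) + 1) = ((i + 1 : Nat) : Int) from hcast, ih (i + 1) _ (by omega)]
      cases ht : all.drop (i + 1) with
      | nil =>
        have hlen : all.length ≤ i + 1 := by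
          have := congrArg List.length ht
          simp at this
          omega
        have hc : (decide (((i + 1 : Nat) : Int) < (all.length : Int))) = false := by
          simp
          omega
        simp [essR]
        intro _ h2
        exfalso
        omega
      | cons x' t' =>
        have hlen : i + 1 < all.length := by
          have := congrArg List.length ht
          simp at this
          omega
        have hc : (decide (((i + 1 : Nat) : Int) < (all.length : Int))) = true := by
          simp
          omega
        have hget : PySem.List.pyGetD all (((i + 1 : Nat) : Int)) "" = x' := by
          rw [PySem.List.pyGetD_natCast]
          have h0 : all[i + 1]? = some x' := by
            have h1 : (List.drop (i + 1) all)[0]? = all[(i + 1) + 0]? := List.getElem?_drop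
            rw [ht] at h1
            simpa using h1.symm
          simp [List.getD, h0]
        simp only [hc, hget, essR, Bool.and_true]
        by_cases h1 : PySem.Chars.startswith (PySem.Chars.strip all[i].toList) ['*', '*'] = true
        · by_cases h2 : (PySem.Str.strip x' != "") = true
          · simp [h1, h2]
          · simp [h1, h2]
        · by_cases h2 : (PySem.Str.strip x' != "") = true
          · simp [h1, h2]
          · simp [h1, h2]
    · rw [List.drop_eq_nil_of_le (by omega)]
      simp [essR]

theorem essA_eq_essB (all : List String) : essA all = essB all := by
  have := essA_go all all.length 0 [] rfl
  rw [essB_eq_essR]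
  simpa [essA] using this

theorem aloopA_true (lines : List String) (s m : String) : ∀ (n i : Nat) (acc : List String), lines.length - i = n →
    aloopA lines s m acc true i = acc ++ lines.drop i := by
  intro n
  induction n with
  | zero =>
    intro i acc h
    rw [aloopA]
    rw [dif_neg (by omega)]
    rw [List.drop_eq_nil_of_le (by omega), List.append_nil]
  | succ n ih =>
    intro i acc h
    rw [aloopA]
    split
    · rename_i hi
      simp only [Bool.not_true, Bool.false_and]
      rw [ih (i + 1) _ (by omega)]
      rw [List.drop_eq_getElem_cons hi]
      simp
    · rename_i hi
      rw [List.drop_eq_nil_of_le (by omega), List.append_nil]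

theorem aloopA_false (lines : List String) (s m : String) : ∀ (n i : Nat) (acc : List String), lines.length - i = n →
    aloopA lines s m acc false i =
      acc ++ (match (lines.drop i).findIdx? (fun l => PySem.Str.strip l == s) with
        | none => lines.drop i
        | some d =>
          (lines.drop i).take (d + 1) ++
            (["\n", "* " ++ m ++ "\n"] ++
              (if lines.length ≤ skipBlank lines (i + d + 1) ||
                  PySem.Str.startswith (PySem.Str.strip (lines.getD (skipBlank lines (i + d + 1)) "")) "**"
               then ["\n"] else [])) ++
            lines.drop (skipBlank lines (i + d + 1))) := by
  intro n
  induction n with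
  | zero =>
    intro i acc h
    rw [aloopA]
    rw [dif_neg (by omega)]
    rw [List.drop_eq_nil_of_le (by omega)]
    simp
  | succ n ih =>
    intro i acc h
    rw [aloopA]
    split
    · rename_i hi
      rw [List.drop_eq_getElem_cons hi, List.findIdx?_cons]
      by_cases hp : (PySem.Str.strip lines[i] == s) = true
      · rw [if_pos hp]
        simp only [Bool.not_false, Bool.true_and, if_pos hp]
        rw [aloopA_true lines s m (lines.length - skipBlank lines (i + 1)) _ _ rfl]
        have hd : List.drop i lines = lines[i] :: List.drop (i + 1) lines := List.drop_eq_getElem_cons hi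
        simp
        rw [hd]
        rfl
      · rw [if_neg hp]
        simp only [Bool.not_false, Bool.true_and, if_neg hp]
        rw [ih (i + 1) _ (by omega)]
        cases hf : (lines.drop (i + 1)).findIdx? (fun l => PySem.Str.strip l == s) with
        | none => simp
        | some d' =>
          have e1 : i + (d' + 1) + 1 = i + 1 + d' + 1 := by omega
          have hd : List.drop i lines = lines[i] :: List.drop (i + 1) lines := List.drop_eq_getElem_cons hi
          simp only [Option.map_some, e1]
          simp
          rw [hd]
          rfl
    · rename_i hi
      rw [List.drop_eq_nil_of_le (by omega)]
      simp

-- ===== VERDICT (by name: the statement is the Claim_ definition above) =====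
theorem insert_message_in_section_spec : Claim_equal_insert_message_in_section := by
  intro lines section_ message _
  unfold Spec_insert_message_in_section insert_message_in_section insert_message_in_section_alt
  rw [aloopA_false lines section_ message (lines.length - 0) 0 [] rfl]
  simp only [List.drop_zero, Nat.zero_add, List.nil_append]
  cases hf : lines.findIdx? (fun l => PySem.Str.strip l == section_) with
  | none => simp [essA_eq_essB]
  | some idx => simp [essA_eq_essB]
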